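-- pv_equiv track=rewrite | github.com/idraper/Physics-Project | wave_math.py | makePowOfTwo
-- ===== SOURCE A (Python) =====
-- def makePowOfTwo(val):
-- 	compare = 1
-- 	if val > compare:
-- 		while val > compare:
-- 			compare = int(compare) << 1
-- 			#print (val, compare)
-- 	elif val < compare:
-- 		compare = 1
-- 	return compare
-- ===== SOURCE B (Python) =====
-- def makePowOfTwo(val):
-- 	if val <= 1:
-- 		return 1
-- 	return 1 << (val - 1).bit_length()
-- ===== Notes on version B (the rewrite author's own statement) =====
-- stated objective: idiomatic
-- what changed: Replaced the doubling while-loop with a closed form: 1 for val <= 1, otherwise 1 << (val-1).bit_length().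
import Mathlib
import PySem

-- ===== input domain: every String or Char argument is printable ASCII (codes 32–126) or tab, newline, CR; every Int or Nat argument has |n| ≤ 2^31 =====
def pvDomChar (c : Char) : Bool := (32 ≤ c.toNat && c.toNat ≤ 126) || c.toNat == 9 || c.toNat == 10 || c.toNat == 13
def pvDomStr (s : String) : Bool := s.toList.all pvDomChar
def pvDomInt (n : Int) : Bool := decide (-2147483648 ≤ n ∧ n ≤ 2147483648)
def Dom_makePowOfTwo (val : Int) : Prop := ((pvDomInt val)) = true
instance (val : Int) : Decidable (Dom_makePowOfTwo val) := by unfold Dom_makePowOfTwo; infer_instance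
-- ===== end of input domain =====

-- B replaces A's doubling while-loop by the closed form 1 <<< bit_length(val-1) (idiomatic; return value only).
-- ===== PORT A =====
-- the while-loop of A; the '1 ≤ compare' conjunct is a totality guard only (compare starts at 1 and only doubles)
def makePowOfTwoLoop (val compare : Int) : Int :=
  if compare < val ∧ 1 ≤ compare then
    makePowOfTwoLoop val (compare <<< (1:Nat))
  else compare
termination_by (val - compare).toNat
decreasing_by
  rename_i h
  have : compare <<< (1:Nat) = compare * 2 := by
    simp [Int.shiftLeft_eq]
  rw [this]; omega

def makePowOfTwo (val : Int) : Int :=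
  let compare : Int := 1
  if val > compare then makePowOfTwoLoop val compare
  else if val < compare then 1
  else compare

-- ===== PORT B =====
def makePowOfTwo_alt (val : Int) : Int :=
  if val ≤ 1 then 1
  else (1 : Int) <<< PySem.Int.bitLength (val - 1)

-- ===== PRECONDITION & SPEC =====
def Spec_makePowOfTwo (val : Int) (out : Int) : Prop := out = makePowOfTwo_alt val
instance (val : Int) (out : Int) : Decidable (Spec_makePowOfTwo val out) := by unfold Spec_makePowOfTwo; infer_instance

-- ===== CLAIM (what is proved, stated in full; the proofs are below) =====
def Claim_equal_makePowOfTwo : Prop := ∀ (val : Int), Dom_makePowOfTwo val → Spec_makePowOfTwo val (makePowOfTwo val)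

-- ===== LEMMAS AND PROOFS =====

-- ===== VERDICT (by name: the statement is the Claim_ definition above) =====
lemma shiftl_one (c : Int) : c <<< (1 : Nat) = c * 2 := by
  simp [Int.shiftLeft_eq]

lemma loop_unfold (val c : Int) :
    makePowOfTwoLoop val c =
      if c < val ∧ 1 ≤ c then makePowOfTwoLoop val (c <<< (1:Nat)) else c := by
  rw [makePowOfTwoLoop]

-- the loop's result, started below val, is the first doubling of c that reaches val
lemma loop_spec (val : Int) : ∀ (n : Nat) (c : Int), (val - c).toNat ≤ n → 1 ≤ c → c < val →
    (val ≤ makePowOfTwoLoop val c ∧ makePowOfTwoLoop val c < 2 * val ∧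
      ∃ j : Nat, makePowOfTwoLoop val c = c * 2 ^ j) := by
  intro n
  induction n with
  | zero => intro c hn h1 hlt; omega
  | succ n ih =>
    intro c hn h1 hlt
    rw [loop_unfold]
    simp only [hlt, h1, and_self, if_true]
    rw [shiftl_one]
    by_cases h2 : c * 2 < val
    · have := ih (c * 2) (by omega) (by omega) h2
      obtain ⟨ha, hb, j, hj⟩ := this
      exact ⟨ha, hb, j + 1, by rw [hj]; ring⟩
    · rw [loop_unfold]
      have : ¬ (c * 2 < val ∧ 1 ≤ c * 2) := by omega
      simp only [this, if_false]
      exact ⟨by omega, by omega, 1, by ring⟩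

lemma pow_unique (j b : Nat) (val : Int) (hj1 : val ≤ 2 ^ j) (hj2 : (2:Int) ^ j < 2 * val)
    (hb1 : val ≤ 2 ^ b) (hb2 : (2:Int) ^ b < 2 * val) : ((2:Int) ^ j = 2 ^ b) := by
  have h1 : (2:Int) ^ j < 2 ^ (b + 1) := by
    calc (2:Int) ^ j < 2 * val := hj2
    _ ≤ 2 * 2 ^ b := by omega
    _ = 2 ^ (b + 1) := by ring
  have h2 : (2:Int) ^ b < 2 ^ (j + 1) := by
    calc (2:Int) ^ b < 2 * val := hb2
    _ ≤ 2 * 2 ^ j := by omega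
    _ = 2 ^ (j + 1) := by ring
  have hj' : j < b + 1 := by
    by_contra h
    exact absurd (pow_le_pow_right₀ (by norm_num : (1:Int) ≤ 2) (by omega : b + 1 ≤ j)) (by omega)
  have hb' : b < j + 1 := by
    by_contra h
    exact absurd (pow_le_pow_right₀ (by norm_num : (1:Int) ≤ 2) (by omega : j + 1 ≤ b)) (by omega)
  have : j = b := by omega
  rw [this]

theorem makePowOfTwo_spec : Claim_equal_makePowOfTwo := by
  intro val _
  unfold Spec_makePowOfTwo makePowOfTwo makePowOfTwo_alt
  by_cases h : val ≤ 1
  · have h1 : ¬ (val > 1) := by omega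
    simp only [h1, if_false, h, if_true]
    split <;> rfl
  · have h1 : val > 1 := by omega
    simp only [h1, if_true, h, if_false]
    obtain ⟨ha, hb, j, hj⟩ := loop_spec val (val - 1).toNat 1 (by omega) (by omega) (by omega)
    rw [hj] at ha hb ⊢
    simp only [one_mul] at ha hb ⊢
    -- B's value: 2 ^ bitLength (val - 1)
    set b := PySem.Int.bitLength (val - 1) with hbdef
    have hshift : (1 : Int) <<< b = 2 ^ b := by
      simp [Int.shiftLeft_eq]
    rw [hshift]
    have hpos : (0:Int) < val - 1 := by omega
    have hna : (val - 1).natAbs = (val - 1).toNat := by omega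
    have hub : (val - 1).natAbs < 2 ^ b := PySem.Int.lt_two_pow_bitLength (val - 1)
    have hlb : 2 ^ (b - 1) ≤ (val - 1).natAbs :=
      PySem.Int.two_pow_bitLength_le (val - 1) (by omega)
    have hbpos : 1 ≤ b := by
      by_contra hc
      have : b = 0 := by omega
      rw [this] at hub
      omega
    have hB1 : val ≤ 2 ^ b := by
      have : ((val - 1).natAbs : Int) < (2:Int) ^ b := by exact_mod_cast hub
      omega
    have hB2 : (2:Int) ^ b < 2 * val := by
      have h2 : (2:Int) ^ (b - 1) ≤ ((val - 1).natAbs : Int) := by exact_mod_cast hlb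
      have hsplit : (2:Int) ^ b = 2 * 2 ^ (b - 1) := by
        conv_lhs => rw [show b = (b - 1) + 1 by omega]
        ring
      omega
    exact pow_unique j b val ha hb hB1 hB2
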